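-- pv_equiv track=rewrite | github.com/modelscope/modelscope | modelscope/preprocessors/nlp/space/fields/gen_field.py | _bucket_by_turn
-- ===== SOURCE A (Python) =====
-- from collections import OrderedDict
--
-- def _bucket_by_turn(encoded_data):
--     turn_bucket = {}
--     for dial in encoded_data:
--         turn_len = len(dial)
--         if turn_len not in turn_bucket:
--             turn_bucket[turn_len] = []
--         turn_bucket[turn_len].append(dial)
--     return OrderedDict(sorted(turn_bucket.items(), key=lambda i: i[0]))
-- ===== SOURCE B (Python) =====
-- from collections import OrderedDict
-- from itertools import groupby
--
-- def _bucket_by_turn(encoded_data):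
--     items = sorted(encoded_data, key=len)
--     return OrderedDict((k, list(g)) for k, g in groupby(items, key=len))
-- ===== Notes on version B (the rewrite author's own statement) =====
-- stated objective: idiomatic
-- what changed: Replaced the dict-bucketing loop plus key-sort by a single stable sort of the dialogues by length followed by itertools.groupby over consecutive equal-length runs.
import Mathlib
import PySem

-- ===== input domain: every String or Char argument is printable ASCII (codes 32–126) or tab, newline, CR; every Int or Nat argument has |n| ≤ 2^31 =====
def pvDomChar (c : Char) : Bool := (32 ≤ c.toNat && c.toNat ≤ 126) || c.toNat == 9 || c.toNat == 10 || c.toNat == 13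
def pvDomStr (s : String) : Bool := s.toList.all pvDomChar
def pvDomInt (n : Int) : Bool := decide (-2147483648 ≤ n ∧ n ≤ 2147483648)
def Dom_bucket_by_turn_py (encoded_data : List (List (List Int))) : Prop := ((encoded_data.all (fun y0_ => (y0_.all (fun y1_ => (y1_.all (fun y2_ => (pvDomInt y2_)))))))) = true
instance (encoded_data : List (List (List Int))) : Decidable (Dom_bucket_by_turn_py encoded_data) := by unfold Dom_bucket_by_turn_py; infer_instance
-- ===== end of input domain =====

-- B replaces A's dict-bucketing + key-sort by one stable sort by length followed by
-- consecutive-run grouping (itertools.groupby); same return value, more idiomatic.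

-- ===== PORT A =====
def bucket_by_turn_py (encoded_data : List (List (List Int))) : List (Int × List (List (List Int))) :=
  let turn_bucket : PySem.Dict Int (List (List (List Int))) :=
    encoded_data.foldl (fun d dial =>
      let turn_len : Int := dial.length
      let d := if d.contains turn_len then d else d.insert turn_len []
      d.modify turn_len [] (fun l => l ++ [dial])) PySem.Dict.empty
  (PySem.Dict.ofList (PySem.List.sorted turn_bucket.items (fun i => i.1) false)).items

-- ===== PORT B =====
-- port of itertools.groupby(items, key=len) with each group materialised: consecutive
-- runs of equal length; the structural recursion groups exactly the same runs.
def bucketRuns : List (List (List Int)) → List (Int × List (List (List Int)))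
  | [] => []
  | x :: xs =>
    match bucketRuns xs with
    | [] => [((x.length : Int), [x])]
    | (k, g) :: rest =>
      if (x.length : Int) == k then (k, x :: g) :: rest
      else ((x.length : Int), [x]) :: (k, g) :: rest

def bucket_by_turn_py_alt (encoded_data : List (List (List Int))) : List (Int × List (List (List Int))) :=
  let items := PySem.List.sorted encoded_data (fun dial => (dial.length : Int)) false
  (PySem.Dict.ofList (bucketRuns items)).items

-- ===== PRECONDITION & SPEC =====
def Spec_bucket_by_turn_py (encoded_data : List (List (List Int))) (out : List (Int × List (List (List Int)))) : Prop := out = bucket_by_turn_py_alt encoded_data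
instance (encoded_data : List (List (List Int))) (out : List (Int × List (List (List Int)))) : Decidable (Spec_bucket_by_turn_py encoded_data out) := by unfold Spec_bucket_by_turn_py; infer_instance

-- ===== CLAIM (what is proved, stated in full; the proofs are below) =====
def Claim_equal_bucket_by_turn_py : Prop := ∀ (encoded_data : List (List (List Int))), Dom_bucket_by_turn_py encoded_data → Spec_bucket_by_turn_py encoded_data (bucket_by_turn_py encoded_data)

-- ===== LEMMAS AND PROOFS =====

-- the dialogue length, as Python's len
def keyL (d : List (List Int)) : Int := d.length

-- the run keys of a list: the first components bucketRuns produces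
def runKeys : List (List (List Int)) → List Int
  | [] => []
  | x :: xs =>
    match runKeys xs with
    | [] => [keyL x]
    | k :: rest =>
      if keyL x == k then k :: rest
      else keyL x :: k :: rest

-- the ascending list of distinct lengths occurring in e
def sortedKeys (e : List (List (List Int))) : List Int :=
  PySem.List.sorted (PySem.Set.ofList (e.map keyL)) (fun k => k) false

-- stability of insertion into a key-sorted list, restricted to one key class
lemma insertBy_filter {α κ : Type} [LinearOrder κ] (key : α → κ) (c : κ) (x : α)
    (ys : List α) (h : ys.Pairwise (fun a b => key a ≤ key b)) :
    (PySem.List.insertBy (fun a b => decide (key a < key b)) x ys).filter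
        (fun z => decide (key z = c)) =
      ys.filter (fun z => decide (key z = c)) ++ (if key x = c then [x] else []) := by
  induction ys with
  | nil =>
    by_cases hc : key x = c <;> simp [PySem.List.insertBy, hc]
  | cons y ys ih =>
    have hy : ∀ z ∈ ys, key y ≤ key z := (List.pairwise_cons.mp h).1
    have hys : ys.Pairwise (fun a b => key a ≤ key b) := (List.pairwise_cons.mp h).2
    by_cases hlt : key x < key y
    · simp only [PySem.List.insertBy, hlt, decide_true, if_true]
      by_cases hc : key x = c
      · have hnil : (y :: ys).filter (fun z => decide (key z = c)) = [] := by
          refine List.filter_eq_nil_iff.mpr ?_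
          intro z hz
          have hyz : key y ≤ key z := by
            rcases List.mem_cons.mp hz with rfl | hz'
            · exact le_refl _
            · exact hy z hz'
          simp only [decide_eq_true_eq]
          intro hzc
          exact absurd (lt_of_lt_of_le hlt hyz) (by rw [hzc, ← hc]; exact lt_irrefl _)
        rw [List.filter_cons_of_pos (by simp [hc]), hnil]
        simp [hc]
      · rw [List.filter_cons_of_neg (by simp [hc])]
        simp [hc]
    · simp only [PySem.List.insertBy, hlt, decide_false, Bool.false_eq_true, if_false]
      rw [List.filter_cons, List.filter_cons, ih hys]
      by_cases hyc : key y = c <;> simp [hyc]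

-- stability of PySem.List.sorted: each key class keeps its original order
lemma sorted_filter_key {α κ : Type} [LinearOrder κ] (key : α → κ) (xs : List α) (c : κ) :
    (PySem.List.sorted xs key false).filter (fun z => decide (key z = c)) =
      xs.filter (fun z => decide (key z = c)) := by
  induction xs using List.reverseRecOn with
  | nil => simp [PySem.List.sorted]
  | append_singleton xs x ih =>
    have hstep : PySem.List.sorted (xs ++ [x]) key false
        = PySem.List.insertBy (fun a b => decide (key a < key b)) x
            (PySem.List.sorted xs key false) := by
      rw [PySem.List.sorted_eq_foldl_insertBy, PySem.List.sorted_eq_foldl_insertBy,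
        List.foldl_append]
      rfl
    rw [hstep, insertBy_filter key c x _ (PySem.List.sorted_pairwise xs key), ih,
      List.filter_append]
    by_cases hc : key x = c <;> simp [hc]

-- on a length-sorted list, bucketRuns is runKeys paired with the key-class filters,
-- runKeys is strictly increasing, and its members are exactly the occurring lengths
lemma runs_spec (t : List (List (List Int)))
    (h : t.Pairwise (fun a b => keyL a ≤ keyL b)) :
    (bucketRuns t = (runKeys t).map (fun k => (k, t.filter (fun z => decide (keyL z = k)))))
    ∧ (runKeys t).Pairwise (· < ·)
    ∧ (∀ k : Int, k ∈ runKeys t ↔ k ∈ t.map keyL)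
    ∧ (∀ x xs, t = x :: xs → ∃ rest, runKeys t = keyL x :: rest) := by
  induction t with
  | nil =>
    refine ⟨rfl, List.Pairwise.nil, by simp [runKeys], by intro x xs hx; cases hx⟩
  | cons x xs ih =>
    have hx : ∀ z ∈ xs, keyL x ≤ keyL z := (List.pairwise_cons.mp h).1
    have hxs : xs.Pairwise (fun a b => keyL a ≤ keyL b) := (List.pairwise_cons.mp h).2
    obtain ⟨hrun, hpw, hmem, hhead⟩ := ih hxs
    have hrEq : runKeys (x :: xs) = (match runKeys xs with
        | [] => [keyL x]
        | k :: rest => if keyL x == k then k :: rest else keyL x :: k :: rest) := rfl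
    have hbEq : bucketRuns (x :: xs) = (match bucketRuns xs with
        | [] => [(keyL x, [x])]
        | (k, g) :: rest =>
          if keyL x == k then (k, x :: g) :: rest
          else (keyL x, [x]) :: (k, g) :: rest) := rfl
    cases xs with
    | nil =>
      refine ⟨?_, ?_, ?_, ?_⟩
      · simp [bucketRuns, runKeys, keyL]
      · simp [runKeys]
      · intro k; simp [runKeys]
      · intro a as ha
        injection ha with h1 h2
        exact ⟨[], by rw [← h1]; rfl⟩
    | cons y ys =>
      obtain ⟨rest, hk⟩ := hhead y ys rfl
      have hxy_le : keyL x ≤ keyL y := hx y (by simp)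
      have hy' : ∀ z ∈ ys, keyL y ≤ keyL z := (List.pairwise_cons.mp hxs).1
      by_cases hxy : keyL x = keyL y
      · -- x joins the first run
        have hr : runKeys (x :: y :: ys) = keyL y :: rest := by
          rw [hrEq, hk]
          simp [hxy]
        have hrestlt : ∀ k ∈ rest, keyL y < k := by
          intro k hk'
          have hpw' := hk ▸ hpw
          exact (List.pairwise_cons.mp hpw').1 k hk'
        refine ⟨?_, ?_, ?_, ?_⟩
        · rw [hbEq, hrun, hk, List.map_cons]
          simp only [hxy, beq_self_eq_true, if_true]
          rw [hr, List.map_cons]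
          congr 1
          · simp [hxy]
          · refine (List.map_congr_left ?_).symm
            intro k hk'
            have hlt := hrestlt k hk'
            rw [List.filter_cons_of_neg (by simp; omega)]
        · rw [hr]; exact hk ▸ hpw
        · intro k
          rw [hr, ← hk, hmem k]
          simp only [List.map_cons, List.mem_cons]
          constructor
          · intro hkin; right; exact hkin
          · rintro (rfl | hkin)
            · rw [hxy]; simp
            · exact hkin
        · intro a as ha
          injection ha with h1 h2
          exact ⟨rest, by rw [hr, ← h1, hxy]⟩
      · -- x starts a fresh run
        have hxNotIn : keyL x ∉ (y :: ys).map keyL := by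
          intro hin
          obtain ⟨z, hz, hzk⟩ := List.mem_map.mp hin
          rcases List.mem_cons.mp hz with rfl | hz'
          · exact hxy hzk.symm
          · have h1 : keyL y ≤ keyL z := hy' z hz'
            have h2 : keyL x ≤ keyL y := hxy_le
            omega
        have hr : runKeys (x :: y :: ys) = keyL x :: keyL y :: rest := by
          rw [hrEq, hk]
          simp [hxy]
        have hfreshlt : ∀ k ∈ runKeys (y :: ys), keyL x < k := by
          intro k hk'
          have hkin : k ∈ (y :: ys).map keyL := (hmem k).mp hk'
          obtain ⟨z, hz, hzk⟩ := List.mem_map.mp hkin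
          have h1 : keyL x ≤ keyL z := hx z hz
          have h2 : keyL x ≠ k := fun he => hxNotIn (he ▸ hkin)
          omega
        refine ⟨?_, ?_, ?_, ?_⟩
        · rw [hbEq, hrun, hk, List.map_cons]
          have hne : (keyL x == keyL y) = false := by simp [hxy]
          simp only [hne, Bool.false_eq_true, if_false]
          rw [hr, List.map_cons, List.map_cons]
          congr 1
          · have hnil : (y :: ys).filter (fun z => decide (keyL z = keyL x)) = [] := by
              refine List.filter_eq_nil_iff.mpr ?_
              intro z hz
              simp only [decide_eq_true_eq]
              intro hzk
              exact hxNotIn (List.mem_map.mpr ⟨z, hz, hzk⟩)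
            rw [List.filter_cons_of_pos (by simp), hnil]
          · congr 1
            · have hlty : keyL x < keyL y := lt_of_le_of_ne hxy_le hxy
              conv_rhs => rw [List.filter_cons_of_neg (by simp only [decide_eq_true_eq]; exact hlty.ne)]
            · refine (List.map_congr_left ?_).symm
              intro k hk'
              have hlt := hfreshlt k (by rw [hk]; exact List.mem_cons_of_mem _ hk')
              rw [List.filter_cons_of_neg (by simp; omega)]
        · rw [hr]
          refine List.pairwise_cons.mpr ⟨?_, hk ▸ hpw⟩
          intro k hk'
          exact hfreshlt k (hk ▸ hk')
        · intro k
          have h2 := hmem k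
          rw [hk] at h2
          rw [hr]
          simp only [List.mem_cons, List.map_cons] at h2 ⊢
          tauto
        · intro a as ha
          injection ha with h1 h2
          exact ⟨keyL y :: rest, by rw [hr, ← h1]⟩

-- a dict built from a list with pairwise-distinct keys has exactly that items list
lemma items_ofList_nodup {ν : Type} (l : List (Int × ν)) (h : (l.map Prod.fst).Nodup) :
    (PySem.Dict.ofList l).items = l := by
  have h2 := PySem.Dict.items_foldl_insert_fresh l Prod.fst Prod.snd PySem.Dict.empty
      (fun a _ => PySem.Dict.contains_empty a.1) h
  simpa [PySem.Dict.ofList, PySem.Dict.update] using h2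

lemma nodup_sortedKeys (e : List (List (List Int))) : (sortedKeys e).Nodup :=
  (PySem.List.sorted_ofList_pairwise_lt (e.map keyL)).imp (fun h => ne_of_lt h)

-- A's value in canonical form
lemma A_canon (e : List (List (List Int))) :
    bucket_by_turn_py e =
      (sortedKeys e).map (fun k => (k, e.filter (fun z => decide (keyL z = k)))) := by
  have hstep : (fun (d : PySem.Dict Int (List (List (List Int)))) (dial : List (List Int)) =>
        (if d.contains (dial.length : Int) then d
         else d.insert (dial.length : Int) []).modify (dial.length : Int) []
          (fun l => l ++ [dial]))
      = fun d dial => d.modify (dial.length : Int) [] (fun l => l ++ [dial]) := by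
    funext d dial
    by_cases hc : d.contains (dial.length : Int) = true
    · simp [hc]
    · have hc' : d.contains (dial.length : Int) = false := by simpa using hc
      simp only [hc', Bool.false_eq_true, if_false, PySem.Dict.modify,
        PySem.Dict.getD_insert_self, PySem.Dict.insert_insert_self,
        PySem.Dict.getD_of_not_contains _ _ hc']
  simp only [bucket_by_turn_py]
  rw [hstep]
  set d := e.foldl (fun d dial => d.modify (dial.length : Int) [] (fun l => l ++ [dial]))
      PySem.Dict.empty with hd
  have hkeys : d.keys = PySem.Set.ofList (e.map keyL) := by
    rw [hd, PySem.Dict.keys_foldl_modify_key e (fun dial => (dial.length : Int)) []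
      (fun _ dial => fun l => l ++ [dial]) PySem.Dict.empty]
    simp only [PySem.Dict.keys_empty]
    rfl
  have hnodup : d.keys.Nodup := by
    rw [hd]
    exact PySem.Dict.nodup_keys_foldl_modify_key e (fun dial => (dial.length : Int)) []
      (fun _ dial => fun l => l ++ [dial]) PySem.Dict.empty (by simp [PySem.Dict.keys_empty])
  have hgetD : ∀ c : Int, d.getD c [] = e.filter (fun z => decide (keyL z = c)) := by
    intro c
    have h1 := PySem.Dict.getD_foldl_modify_append
      (e.map (fun x => ((x.length : Int), x))) PySem.Dict.empty c
    rw [List.foldl_map] at h1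
    simp only [List.filter_map, List.map_map] at h1
    rw [hd]
    rw [h1]
    simp only [PySem.Dict.getD_empty, List.nil_append]
    have h2 : List.map ((fun x : Int × List (List Int) => x.2) ∘ fun x => ((x.length : Int), x))
        (List.filter ((fun p : Int × List (List Int) => p.1 == c) ∘ fun x => ((x.length : Int), x)) e)
        = List.map (fun x : List (List Int) => x) (List.filter (fun z => decide (keyL z = c)) e) := rfl
    rw [h2, List.map_id']
  have hFeq : (fun k : Int => (k, d.getD k []))
      = fun k => (k, e.filter (fun z => decide (keyL z = k))) := by
    funext k; rw [hgetD k]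
  have hitems : d.items = d.keys.map (fun k => (k, e.filter (fun z => decide (keyL z = k)))) := by
    rw [PySem.Dict.items_eq_map_keys d hnodup [], hFeq]
  have hpair : List.Pairwise (fun a b : Int × List (List (List Int)) => a.1 < b.1)
      ((sortedKeys e).map (fun k => (k, e.filter (fun z => decide (keyL z = k))))) := by
    refine List.pairwise_map.mpr ?_
    simpa using PySem.List.sorted_ofList_pairwise_lt (e.map keyL)
  have hperm : ((sortedKeys e).map
      (fun k => (k, e.filter (fun z => decide (keyL z = k))))).Perm d.items := by
    rw [hitems, hkeys]
    exact (PySem.List.sorted_perm (PySem.Set.ofList (e.map keyL)) (fun k => k) false).map _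
  have hs : PySem.List.sorted d.items (fun i => i.1) false
      = (sortedKeys e).map (fun k => (k, e.filter (fun z => decide (keyL z = k)))) :=
    PySem.List.sorted_eq_of_perm_of_pairwise_lt _ _ _ hperm hpair
  rw [hs, items_ofList_nodup]
  rw [List.map_map]
  have : (Prod.fst ∘ fun k : Int =>
      (k, e.filter (fun z => decide (keyL z = k)))) = id := rfl
  rw [this, List.map_id]
  exact nodup_sortedKeys e

-- B's value in canonical form
lemma B_canon (e : List (List (List Int))) :
    bucket_by_turn_py_alt e =
      (sortedKeys e).map (fun k => (k, e.filter (fun z => decide (keyL z = k)))) := by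
  have hkeyfun : (fun dial : List (List Int) => (dial.length : Int)) = keyL := rfl
  simp only [bucket_by_turn_py_alt, hkeyfun]
  set s := PySem.List.sorted e keyL false with hsdef
  have hs_pw : s.Pairwise (fun a b => keyL a ≤ keyL b) := PySem.List.sorted_pairwise e keyL
  obtain ⟨hrun, hpw, hmem, -⟩ := runs_spec s hs_pw
  have h1 : (runKeys s).Nodup := hpw.imp (fun h => ne_of_lt h)
  have hkeysEq : runKeys s = sortedKeys e := by
    have hperm : (runKeys s).Perm (sortedKeys e) := by
      refine (List.perm_ext_iff_of_nodup h1 (nodup_sortedKeys e)).mpr ?_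
      intro k
      rw [hmem k]
      constructor
      · intro hkin
        obtain ⟨z, hz, hzk⟩ := List.mem_map.mp hkin
        have hze : z ∈ e := (PySem.List.mem_sorted e keyL false z).mp hz
        simp only [sortedKeys]
        rw [PySem.List.mem_sorted, PySem.Set.mem_ofList]
        exact List.mem_map.mpr ⟨z, hze, hzk⟩
      · intro hkin
        simp only [sortedKeys] at hkin
        rw [PySem.List.mem_sorted, PySem.Set.mem_ofList] at hkin
        obtain ⟨z, hze, hzk⟩ := List.mem_map.mp hkin
        exact List.mem_map.mpr ⟨z, (PySem.List.mem_sorted e keyL false z).mpr hze, hzk⟩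
    exact PySem.List.eq_of_perm_of_pairwise_le_of_injective (fun k => k)
      (fun a b hab => hab) hperm (hpw.imp (fun h => le_of_lt h))
      ((PySem.List.sorted_ofList_pairwise_lt (e.map keyL)).imp (fun h => le_of_lt h))
  rw [hrun, items_ofList_nodup]
  · have hF : (fun k : Int => (k, s.filter (fun z => decide (keyL z = k))))
        = fun k => (k, e.filter (fun z => decide (keyL z = k))) := by
      funext k
      rw [hsdef, sorted_filter_key keyL e k]
    rw [hF, hkeysEq]
  · rw [List.map_map]
    have : (Prod.fst ∘ fun k : Int =>
        (k, s.filter (fun z => decide (keyL z = k)))) = id := rfl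
    rw [this, List.map_id]
    exact h1

-- ===== VERDICT (by name: the statement is the Claim_ definition above) =====
theorem bucket_by_turn_py_spec : Claim_equal_bucket_by_turn_py := by
  intro e _
  unfold Spec_bucket_by_turn_py
  rw [A_canon, B_canon]
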